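-- pv_equiv track=rewrite | github.com/isk02206/python | informatics/previous informatics/Infomatics-1/Info_grroup_serise5/maya_number.py | maya2deci
-- ===== SOURCE A (Python) =====
-- def maya2deci(seq):
--
--     list1 = seq.split(' ')[::-1]
--
--     list2 = [1,20,360]
--
--     pos = 0
--
--     count = 0
--
--     result = 0
--
--     while pos != len(list1):
--
--         for char in list1[pos]:
--
--             if char == '.':
--                 count += 1
--
--             elif char == '-':
--                 count += 5
--
--             elif char == 'S':
--                 count = 0
--
--         if pos >= 2:
--
--             result += 360 * count * (20 ** (pos-2))
--
--         else:
--
--             result += count * (20**pos)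
--
--         count = 0
--         pos += 1
--
--     return result
-- ===== SOURCE B (Python) =====
-- def maya2deci(seq):
--     # Horner's method over the tokens in most-significant-first order:
--     # no reversal, no power computation; the place weight is kept implicitly
--     # by multiplying the accumulator by 18 across the place-1/place-2 boundary
--     # and by 20 everywhere else.
--     def digit(tok):
--         c = 0
--         for ch in tok:
--             if ch == '.':
--                 c += 1
--             elif ch == '-':
--                 c += 5
--             elif ch == 'S':
--                 c = 0
--         return c
--
--     toks = seq.split(' ')
--     result = digit(toks[0])
--     for i in range(1, len(toks)):
--         place = len(toks) - 1 - i          # place of the token being added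
--         result = result * (18 if place == 1 else 20) + digit(toks[i])
--     return result
-- ===== Notes on version B (the rewrite author's own statement) =====
-- stated objective: alternative
-- what changed: Replaces the reverse-then-index loop that recomputes each place weight with 20**pos (and the 360 special case) by a single Horner-style fold over the tokens in their original most-significant-first order, multiplying the accumulator by 18 across the place-1/place-2 boundary and by 20 otherwise, so no reversal and no exponentiation is performed.
import Mathlib
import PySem

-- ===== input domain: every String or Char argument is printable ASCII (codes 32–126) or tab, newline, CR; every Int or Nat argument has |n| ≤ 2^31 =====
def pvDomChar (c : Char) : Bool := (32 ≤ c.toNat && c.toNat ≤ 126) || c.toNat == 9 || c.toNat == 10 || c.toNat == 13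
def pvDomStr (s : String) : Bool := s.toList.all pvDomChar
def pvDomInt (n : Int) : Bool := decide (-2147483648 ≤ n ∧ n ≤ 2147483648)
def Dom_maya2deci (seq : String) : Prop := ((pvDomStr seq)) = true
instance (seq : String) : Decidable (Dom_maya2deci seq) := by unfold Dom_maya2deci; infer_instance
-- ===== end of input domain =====

-- B replaces A's reverse-and-recompute-20**pos loop by a Horner fold over the
-- tokens in original order (multiplier 18 at the place-1/place-2 boundary, 20
-- elsewhere): a different algorithm of the same cost ("alternative").


-- ===== PORT A =====
-- inner 'for char in list1[pos]' loop computing count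
def mayaCountA (tok : String) : Int :=
  tok.toList.foldl
    (fun count char =>
      if char = '.' then count + 1
      else if char = '-' then count + 5
      else if char = 'S' then 0
      else count) 0

-- the 'while pos != len(list1)' loop: recursion over list1 carrying pos and result
def mayaWhileA : List String → Nat → Int → Int
  | [], _, result => result
  | tok :: rest, pos, result =>
      let count := mayaCountA tok
      mayaWhileA rest (pos + 1)
        (result + (if pos ≥ 2 then 360 * count * 20 ^ (pos - 2) else count * 20 ^ pos))

def maya2deci (seq : String) : Int :=
  -- seq.split(' ') with the nonempty separator always succeeds (getD is never taken);
  -- [::-1] is reversal (PySem.Str.slice?_none_none_neg_one)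
  let list1 := ((PySem.Str.split? seq " ").getD []).reverse
  mayaWhileA list1 0 0

-- ===== PORT B =====
-- Source B's digit(tok) helper
def mayaDigitB (tok : String) : Int :=
  tok.toList.foldl
    (fun c ch =>
      if ch = '.' then c + 1
      else if ch = '-' then c + 5
      else if ch = 'S' then 0
      else c) 0

-- Source B's 'for i in range(1, len(toks))' Horner loop: for the token now being
-- added, its place is the number of tokens still after it (= rest.length)
def mayaHornerB : List String → Int → Int
  | [], result => result
  | tok :: rest, result =>
      mayaHornerB rest (result * (if rest.length = 1 then 18 else 20) + mayaDigitB tok)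

def maya2deci_alt (seq : String) : Int :=
  match (PySem.Str.split? seq " ").getD [] with
  | [] => 0            -- unreachable: split(' ') always yields at least one token
  | tok :: rest => mayaHornerB rest (mayaDigitB tok)

-- ===== PRECONDITION & SPEC =====
def Spec_maya2deci (seq : String) (out : Int) : Prop := out = maya2deci_alt seq
instance (seq : String) (out : Int) : Decidable (Spec_maya2deci seq out) := by unfold Spec_maya2deci; infer_instance

-- ===== CLAIM (what is proved, stated in full; the proofs are below) =====
def Claim_equal_maya2deci : Prop := ∀ (seq : String), Dom_maya2deci seq → Spec_maya2deci seq (maya2deci seq)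

-- ===== LEMMAS AND PROOFS =====

-- the place weight A computes: 1, 20, 360, 7200, …
def mayaW (p : Nat) : Int := if p ≥ 2 then 360 * 20 ^ (p - 2) else 20 ^ p

-- positional sum of an LSB-first token list starting at place pos (A's loop as a sum)
def mayaSum : List String → Nat → Int
  | [], _ => 0
  | tok :: rest, pos => mayaCountA tok * mayaW pos + mayaSum rest (pos + 1)

theorem mayaWhileA_eq_sum (l : List String) (pos : Nat) (r : Int) :
    mayaWhileA l pos r = r + mayaSum l pos := by
  induction l generalizing pos r with
  | nil => simp [mayaWhileA, mayaSum]
  | cons tok rest ih =>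
      simp only [mayaWhileA, mayaSum, ih]
      unfold mayaW
      split_ifs <;> ring

theorem mayaW_succ (n : Nat) :
    (if n = 1 then (18 : Int) else 20) * mayaW n = mayaW (n + 1) := by
  rcases n with _ | _ | n <;> simp [mayaW, pow_succ] <;> ring_nf

theorem mayaSum_append (xs : List String) (x : String) (pos : Nat) :
    mayaSum (xs ++ [x]) pos = mayaSum xs pos + mayaCountA x * mayaW (pos + xs.length) := by
  induction xs generalizing pos with
  | nil => simp [mayaSum]
  | cons t rest ih =>
      simp only [List.cons_append, mayaSum, ih, List.length_cons]
      rw [show pos + (rest.length + 1) = pos + 1 + rest.length by omega]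
      ring

theorem mayaDigitB_eq (tok : String) : mayaDigitB tok = mayaCountA tok := rfl

theorem mayaHornerB_eq (l : List String) (acc : Int) :
    mayaHornerB l acc = acc * mayaW l.length + mayaSum l.reverse 0 := by
  induction l generalizing acc with
  | nil => simp [mayaHornerB, mayaSum, mayaW]
  | cons tok rest ih =>
      simp only [mayaHornerB, ih, List.reverse_cons, mayaSum_append,
        List.length_reverse, List.length_cons, mayaDigitB_eq, Nat.zero_add]
      rw [← mayaW_succ rest.length]
      ring

-- ===== VERDICT (by name: the statement is the Claim_ definition above) =====
theorem maya2deci_spec : Claim_equal_maya2deci := by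
  intro seq _
  unfold Spec_maya2deci maya2deci maya2deci_alt
  cases h : (PySem.Str.split? seq " ").getD [] with
  | nil => simp [mayaWhileA]
  | cons tok rest =>
      simp only [mayaWhileA_eq_sum, mayaHornerB_eq, zero_add, mayaDigitB_eq]
      simp only [List.reverse_cons, mayaSum_append, List.length_reverse, Nat.zero_add]
      ring
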